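-- pv_equiv track=rewrite | github.com/salgeremia/deposito | word_converter.py | word_converter
-- ===== SOURCE A (Python) =====
-- def word_converter(word_lower_case):
--     # 97-122
--     word_upper_case = ''
--     for char in word_lower_case:
--         value = ord(char)
--         if 97 <= value <= 122:
--             word_upper_case += chr(value-32)
--         else:
--             return '*'*len(word_lower_case)
--     return word_upper_case
-- ===== SOURCE B (Python) =====
-- def word_converter(word_lower_case):
--     # Two passes: validate first, then transform in one expression.
--     if all(97 <= ord(c) <= 122 for c in word_lower_case):
--         return ''.join(chr(ord(c) - 32) for c in word_lower_case)
--     return '*' * len(word_lower_case)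
-- ===== Notes on version B (the rewrite author's own statement) =====
-- stated objective: simpler
-- what changed: B separates validation from transformation: one pass checks all characters are lowercase ASCII letters, then a single join builds the uppercase string (or asterisks), instead of A's fused loop with an early return and string accumulation.
import Mathlib
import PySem

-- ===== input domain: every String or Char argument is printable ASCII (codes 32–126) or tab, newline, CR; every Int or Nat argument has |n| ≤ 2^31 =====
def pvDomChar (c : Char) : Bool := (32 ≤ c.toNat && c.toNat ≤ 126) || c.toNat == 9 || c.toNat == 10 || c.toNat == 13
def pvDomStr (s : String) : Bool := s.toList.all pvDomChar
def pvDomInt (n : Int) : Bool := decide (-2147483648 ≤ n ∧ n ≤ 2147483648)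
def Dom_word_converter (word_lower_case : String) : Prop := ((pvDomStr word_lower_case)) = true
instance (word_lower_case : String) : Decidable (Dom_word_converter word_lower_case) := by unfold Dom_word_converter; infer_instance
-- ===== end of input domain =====

-- B separates validation from transformation (one all-check, then one map), instead of A's fused loop with early return.

-- ===== PORT A =====
-- A's for-loop with accumulator and early return; n = len(word_lower_case), fixed before the loop.
def wcLoopA (n : Nat) (acc : List Char) : List Char → List Char
  | [] => acc
  | c :: rest =>
    if 97 ≤ c.toNat ∧ c.toNat ≤ 122 then
      wcLoopA n (acc ++ [Char.ofNat (c.toNat - 32)]) rest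
    else
      List.replicate n '*'

def word_converter (word_lower_case : String) : String :=
  String.mk (wcLoopA word_lower_case.toList.length [] word_lower_case.toList)

-- ===== PORT B =====
def word_converter_alt (word_lower_case : String) : String :=
  let cs := word_lower_case.toList
  if cs.all (fun c => 97 ≤ c.toNat && c.toNat ≤ 122) then
    String.mk (cs.map (fun c => Char.ofNat (c.toNat - 32)))
  else
    String.mk (List.replicate cs.length '*')

-- ===== PRECONDITION & SPEC =====
def Spec_word_converter (word_lower_case : String) (out : String) : Prop := out = word_converter_alt word_lower_case
instance (word_lower_case : String) (out : String) : Decidable (Spec_word_converter word_lower_case out) := by unfold Spec_word_converter; infer_instance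

-- ===== CLAIM (what is proved, stated in full; the proofs are below) =====
def Claim_equal_word_converter : Prop := ∀ (word_lower_case : String), Dom_word_converter word_lower_case → Spec_word_converter word_lower_case (word_converter word_lower_case)

-- ===== LEMMAS AND PROOFS =====
theorem wcLoopA_eq (n : Nat) (acc cs : List Char) :
    wcLoopA n acc cs =
      if cs.all (fun c => 97 ≤ c.toNat && c.toNat ≤ 122) then
        acc ++ cs.map (fun c => Char.ofNat (c.toNat - 32))
      else
        List.replicate n '*' := by
  induction cs generalizing acc with
  | nil => simp [wcLoopA]
  | cons c rest ih =>
    by_cases h : 97 ≤ c.toNat ∧ c.toNat ≤ 122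
    · simp [wcLoopA, h, ih, List.all_cons]
    · have hb : ¬ (97 ≤ c.toNat && c.toNat ≤ 122) = true := by
        simpa [decide_eq_true_iff] using h
      simp [wcLoopA, h, List.all_cons, hb]

-- ===== VERDICT (by name: the statement is the Claim_ definition above) =====
theorem word_converter_spec : Claim_equal_word_converter := by
  intro s _
  unfold Spec_word_converter word_converter word_converter_alt
  rw [wcLoopA_eq]
  by_cases h : (s.toList.all fun c => 97 ≤ c.toNat && c.toNat ≤ 122) = true
  · simp [h]
  · simp [h]
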